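-- pv_equiv track=rewrite | github.com/raven-dev-ops/Bug_Bounty_AI_Hunter | scripts/publish_knowledge_docs.py | _demote_h1
-- ===== SOURCE A (Python) =====
-- def _demote_h1(text):
--     lines = []
--     in_code = False
--     for line in (text or "").splitlines():
--         stripped = line.strip()
--         if stripped.startswith("```"):
--             in_code = not in_code
--             lines.append(line)
--             continue
--         if not in_code and line.startswith("# "):
--             lines.append("## " + line[2:])
--             continue
--         lines.append(line)
--     return "\n".join(lines).rstrip() + "\n"
-- ===== SOURCE B (Python) =====
-- def _prefix_counts(flags):
--     counts, c = [], 0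
--     for f in flags:
--         counts.append(c)
--         c += f
--     return counts
--
--
-- def _demote_h1(text):
--     src = (text or "").splitlines()
--     fence = [ln.strip().startswith("```") for ln in src]
--     out = [
--         "##" + ln[1:] if (not f and c % 2 == 0 and ln.startswith("# ")) else ln
--         for ln, f, c in zip(src, fence, _prefix_counts(fence))
--     ]
--     return "\n".join(out).rstrip() + "\n"
-- ===== Notes on version B (the rewrite author's own statement) =====
-- stated objective: alternative
-- what changed: Replaces A's single-pass boolean in_code state machine by a two-pass decomposition: first compute per-line fence flags and prefix fence counts, then demote headers with a pure pointwise map keyed on count parity.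
import Mathlib
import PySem

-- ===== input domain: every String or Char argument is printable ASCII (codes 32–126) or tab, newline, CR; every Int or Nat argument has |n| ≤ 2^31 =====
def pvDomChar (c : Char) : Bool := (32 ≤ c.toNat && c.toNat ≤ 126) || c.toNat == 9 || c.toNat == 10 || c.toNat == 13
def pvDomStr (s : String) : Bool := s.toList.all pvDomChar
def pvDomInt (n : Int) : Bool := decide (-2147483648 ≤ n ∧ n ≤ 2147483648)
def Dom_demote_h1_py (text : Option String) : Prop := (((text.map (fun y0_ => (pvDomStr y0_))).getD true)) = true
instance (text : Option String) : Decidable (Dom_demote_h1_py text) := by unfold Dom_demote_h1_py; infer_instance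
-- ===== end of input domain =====

-- B replaces A's per-line boolean state machine by a two-pass decomposition (fence flags +
-- prefix fence counts, then a pure pointwise map); objective: alternative, same cost.

-- ===== PORT A =====
-- literal transliteration of A's loop: foldl over the split lines carrying (lines, in_code)
def demote_h1_py (text : Option String) : String :=
  let s := (text.getD "").toList
  let res := (PySem.Chars.splitlines s).foldl
    (fun (st : List (List Char) × Bool) (line : List Char) =>
      let stripped := PySem.Chars.strip line
      if PySem.Chars.startswith stripped "```".toList then
        (st.1 ++ [line], !st.2)
      else if !st.2 && PySem.Chars.startswith line "# ".toList then
        (st.1 ++ ["## ".toList ++ PySem.Chars.slice line (some 2) none], st.2)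
      else
        (st.1 ++ [line], st.2))
    ([], false)
  String.ofList (PySem.Chars.rstrip (PySem.Chars.join "\n".toList res.1) ++ "\n".toList)

-- ===== PORT B =====
-- helper: B's _prefix_counts loop (counts of fences strictly before each position)
def pvPrefixCounts (flags : List Bool) : List Nat :=
  (flags.foldl (fun (st : List Nat × Nat) f =>
    (st.1 ++ [st.2], st.2 + (if f then 1 else 0))) ([], 0)).1

def demote_h1_py_alt (text : Option String) : String :=
  let src := PySem.Chars.splitlines (text.getD "").toList
  let fence := src.map (fun ln => PySem.Chars.startswith (PySem.Chars.strip ln) "```".toList)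
  let out := (src.zip (fence.zip (pvPrefixCounts fence))).map (fun p =>
    if !p.2.1 && p.2.2 % 2 == 0 && PySem.Chars.startswith p.1 "# ".toList then
      "##".toList ++ PySem.Chars.slice p.1 (some 1) none
    else p.1)
  String.ofList (PySem.Chars.rstrip (PySem.Chars.join "\n".toList out) ++ "\n".toList)

-- ===== PRECONDITION & SPEC =====
def Spec_demote_h1_py (text : Option String) (out : String) : Prop := out = demote_h1_py_alt text
instance (text : Option String) (out : String) : Decidable (Spec_demote_h1_py text out) := by unfold Spec_demote_h1_py; infer_instance

-- ===== CLAIM (what is proved, stated in full; the proofs are below) =====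
def Claim_equal_demote_h1_py : Prop := ∀ (text : Option String), Dom_demote_h1_py text → Spec_demote_h1_py text (demote_h1_py text)

-- ===== LEMMAS AND PROOFS =====

-- counts produced starting from running count c (structural form of pvPrefixCounts)
def pvCountsFrom : List Bool → Nat → List Nat
  | [], _ => []
  | f :: fs, c => c :: pvCountsFrom fs (c + (if f then 1 else 0))

lemma pvPrefixCounts_fold (fs : List Bool) (acc : List Nat) (c : Nat) :
    (fs.foldl (fun (st : List Nat × Nat) f =>
      (st.1 ++ [st.2], st.2 + (if f then 1 else 0))) (acc, c)).1
      = acc ++ pvCountsFrom fs c := by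
  induction fs generalizing acc c with
  | nil => simp [pvCountsFrom]
  | cons f fs ih => simp [pvCountsFrom, ih, List.append_assoc]

lemma pvPrefixCounts_eq (fs : List Bool) : pvPrefixCounts fs = pvCountsFrom fs 0 := by
  simpa using pvPrefixCounts_fold fs [] 0

-- the key invariant: A's fold, started with accumulator acc and state b, produces
-- acc ++ B's pointwise map, provided c's parity encodes b.
lemma pvMain (src : List (List Char)) (acc : List (List Char)) (b : Bool) (c : Nat)
    (hc : (c % 2 == 0) = !b) :
    (src.foldl
      (fun (st : List (List Char) × Bool) (line : List Char) =>
        let stripped := PySem.Chars.strip line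
        if PySem.Chars.startswith stripped "```".toList then
          (st.1 ++ [line], !st.2)
        else if !st.2 && PySem.Chars.startswith line "# ".toList then
          (st.1 ++ ["## ".toList ++ PySem.Chars.slice line (some 2) none], st.2)
        else
          (st.1 ++ [line], st.2))
      (acc, b)).1
    = acc ++
      ((src.zip ((src.map (fun ln => PySem.Chars.startswith (PySem.Chars.strip ln) "```".toList)).zip
          (pvCountsFrom (src.map (fun ln => PySem.Chars.startswith (PySem.Chars.strip ln) "```".toList)) c))).map
        (fun p =>
          if !p.2.1 && p.2.2 % 2 == 0 && PySem.Chars.startswith p.1 "# ".toList then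
            "##".toList ++ PySem.Chars.slice p.1 (some 1) none
          else p.1)) := by
  induction src generalizing acc b c with
  | nil => simp
  | cons ln src ih =>
    by_cases hf : PySem.Chars.startswith (PySem.Chars.strip ln) "```".toList = true
    · -- fence line: state flips, parity of count flips
      have hc' : ((c + 1) % 2 == 0) = !(!b) := by
        cases b <;> simp_all <;> omega
      simp only [List.foldl_cons, List.map_cons, pvCountsFrom, List.zip_cons_cons,
        List.map_cons, hf, if_pos]
      rw [show (if (!true && c % 2 == 0 && PySem.Chars.startswith ln "# ".toList) = true then
            "##".toList ++ PySem.Chars.slice ln (some 1) none else ln) = ln from by simp]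
      conv_rhs => rw [List.append_cons]
      exact ih (acc ++ [ln]) (!b) (c + 1) hc'
    · -- non-fence line
      have hfb : PySem.Chars.startswith (PySem.Chars.strip ln) "```".toList = false :=
        by simpa using hf
      by_cases hd : (!b && PySem.Chars.startswith ln "# ".toList) = true
      · -- demoted header line
        have hs : PySem.Chars.startswith ln "# ".toList = true := ((Bool.and_eq_true _ _).mp hd).2
        have hb : b = false := by simpa using ((Bool.and_eq_true _ _).mp hd).1
        have hpre : "# ".toList <+: ln := (PySem.Chars.startswith_iff ln _).1 hs
        obtain ⟨rest, hrest⟩ := hpre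
        have heq : "## ".toList ++ PySem.Chars.slice ln (some 2) none
            = "##".toList ++ PySem.Chars.slice ln (some 1) none := by
          rw [PySem.Chars.slice_eq_listSlice, PySem.Chars.slice_eq_listSlice,
              PySem.List.slice_from ln (show (0:Int) ≤ 2 by norm_num),
              PySem.List.slice_from ln (show (0:Int) ≤ 1 by norm_num), ← hrest]
          simp
        simp only [List.foldl_cons, List.map_cons, pvCountsFrom, List.zip_cons_cons,
          List.map_cons]
        rw [show (if PySem.Chars.startswith (PySem.Chars.strip ln) "```".toList then
              (acc ++ [ln], !b)
            else if !b && PySem.Chars.startswith ln "# ".toList then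
              (acc ++ ["## ".toList ++ PySem.Chars.slice ln (some 2) none], b)
            else (acc ++ [ln], b))
            = (acc ++ ["## ".toList ++ PySem.Chars.slice ln (some 2) none], b) from by rw [if_neg (by simpa using hfb), if_pos hd]]
        have hct : (c % 2 == 0) = true := by rw [hc, hb]; rfl
        rw [show (if (!PySem.Chars.startswith (PySem.Chars.strip ln) "```".toList
              && c % 2 == 0 && PySem.Chars.startswith ln "# ".toList) = true then
            "##".toList ++ PySem.Chars.slice ln (some 1) none else ln)
            = "## ".toList ++ PySem.Chars.slice ln (some 2) none from by
          rw [hfb, hct, hs, heq]; simp]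
        rw [show (c + if PySem.Chars.startswith (PySem.Chars.strip ln) "```".toList = true
            then 1 else 0) = c from by rw [hfb]; simp]
        conv_rhs => rw [List.append_cons]
        exact ih (acc ++ ["## ".toList ++ PySem.Chars.slice ln (some 2) none]) b c hc
      · -- plain line
        have hdb : (!b && PySem.Chars.startswith ln "# ".toList) = false := by
          simpa using hd
        simp only [List.foldl_cons, List.map_cons, pvCountsFrom, List.zip_cons_cons,
          List.map_cons]
        rw [show (if PySem.Chars.startswith (PySem.Chars.strip ln) "```".toList then
              (acc ++ [ln], !b)
            else if !b && PySem.Chars.startswith ln "# ".toList then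
              (acc ++ ["## ".toList ++ PySem.Chars.slice ln (some 2) none], b)
            else (acc ++ [ln], b)) = (acc ++ [ln], b) from by rw [hfb, hdb]; simp]
        have ih' := ih (acc ++ [ln]) b (c + (if false then 1 else 0)) (by simpa using hc)
        simp only [] at ih'
        rw [ih']
        have hcond : (c % 2 == 0 && PySem.Chars.startswith ln "# ".toList) = false := by
          cases b with
          | true =>
            have h1 : (c % 2 == 0) = false := by simpa using hc
            rw [h1, Bool.false_and]
          | false =>
            have h1 : PySem.Chars.startswith ln "# ".toList = false := by simpa using hdb
            rw [h1, Bool.and_false]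
        simp only [hfb, Bool.not_false, Bool.true_and, hcond, Bool.false_eq_true, if_false]
        simp [List.append_assoc]

-- ===== VERDICT (by name: the statement is the Claim_ definition above) =====
theorem demote_h1_py_spec : Claim_equal_demote_h1_py := by
  intro text _
  unfold Spec_demote_h1_py demote_h1_py demote_h1_py_alt
  simp only [pvPrefixCounts_eq]
  rw [pvMain (PySem.Chars.splitlines (text.getD "").toList) [] false 0 (by decide)]
  simp
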